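-- pv_equiv track=rewrite | github.com/rebryant/wmc | benchmarks/generators/max_precision.py | weightString
-- ===== SOURCE A (Python) =====
-- def weightString(scaled, sigdigs):
--     wstring = ""
--     for i in range(sigdigs):
--         digit = scaled % 10
--         scaled = scaled // 10
--         wstring = str(digit) + wstring
--     wstring = str(scaled) + "." + wstring
--     return wstring
-- ===== SOURCE B (Python) =====
-- def weightString(scaled, sigdigs):
--     if sigdigs <= 0:
--         return f"{scaled}."
--     q, r = divmod(scaled, 10 ** sigdigs)
--     return f"{q}.{str(r).zfill(sigdigs)}"
-- ===== Notes on version B (the rewrite author's own statement) =====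
-- stated objective: faster
-- what changed: Replaces the per-digit peel-and-prepend loop (sigdigs big-int divisions and string prepends) with a single divmod by 10**sigdigs plus zero-padded formatting of the remainder.
import Mathlib
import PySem

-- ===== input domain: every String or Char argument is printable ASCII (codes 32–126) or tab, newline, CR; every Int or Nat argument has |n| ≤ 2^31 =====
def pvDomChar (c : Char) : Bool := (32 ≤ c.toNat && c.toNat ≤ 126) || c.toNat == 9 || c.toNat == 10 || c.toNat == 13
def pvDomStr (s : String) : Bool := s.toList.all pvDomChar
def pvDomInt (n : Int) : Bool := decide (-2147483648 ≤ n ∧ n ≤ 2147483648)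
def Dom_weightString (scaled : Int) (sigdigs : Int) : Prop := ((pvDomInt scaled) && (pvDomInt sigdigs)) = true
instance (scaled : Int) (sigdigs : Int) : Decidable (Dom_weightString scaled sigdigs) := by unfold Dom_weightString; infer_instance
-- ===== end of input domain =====

-- B replaces A's per-digit peel-and-prepend loop by one divmod + zero-padded formatting; proved equal on all inputs.


-- ===== PORT A =====
-- for i in range(sigdigs): digit = scaled % 10; scaled = scaled // 10; wstring = str(digit) + wstring
def weightString (scaled : Int) (sigdigs : Int) : String :=
  let st := (PySem.List.pyRange 0 sigdigs 1).foldl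
    (fun (p : Int × List Char) _ =>
      (PySem.Int.floordiv p.1 10, PySem.Int.toChars (PySem.Int.mod p.1 10) ++ p.2))
    (scaled, [])
  String.mk (PySem.Int.toChars st.1 ++ '.' :: st.2)

-- ===== PORT B =====
-- if sigdigs <= 0: return f"{scaled}." ; q, r = divmod(scaled, 10**sigdigs); return f"{q}.{str(r).zfill(sigdigs)}"
def weightString_alt (scaled : Int) (sigdigs : Int) : String :=
  if sigdigs ≤ 0 then String.mk (PySem.Int.toChars scaled ++ ['.'])
  else
    let q := PySem.Int.floordiv scaled ((10 : Int) ^ sigdigs.toNat)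
    let r := PySem.Int.mod scaled ((10 : Int) ^ sigdigs.toNat)
    String.mk (PySem.Int.toChars q ++ '.' :: PySem.Chars.zfill (PySem.Int.toChars r) sigdigs)

-- ===== PRECONDITION & SPEC =====
def Spec_weightString (scaled : Int) (sigdigs : Int) (out : String) : Prop := out = weightString_alt scaled sigdigs
instance (scaled : Int) (sigdigs : Int) (out : String) : Decidable (Spec_weightString scaled sigdigs out) := by unfold Spec_weightString; infer_instance

-- ===== CLAIM (what is proved, stated in full; the proofs are below) =====
def Claim_equal_weightString : Prop := ∀ (scaled : Int) (sigdigs : Int), Dom_weightString scaled sigdigs → Spec_weightString scaled sigdigs (weightString scaled sigdigs)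

-- ===== LEMMAS AND PROOFS =====

-- digits of m, most significant first (= what Nat.toDigits 10 computes)
def myD (m : Nat) : List Char :=
  if _ : m < 10 then [Nat.digitChar m]
  else myD (m / 10) ++ [Nat.digitChar (m % 10)]
  decreasing_by exact Nat.div_lt_self (by omega) (by omega)

-- the last k digits of m, zero-padded to width k, most significant first
def padNat : Nat → Nat → List Char
  | 0, _ => []
  | k + 1, m => padNat k (m / 10) ++ [Nat.digitChar (m % 10)]

-- the char list A's loop builds after k iterations starting from n
def Lc : Int → Nat → List Char
  | _, 0 => []
  | n, k + 1 => Lc (PySem.Int.floordiv n 10) k ++ [Nat.digitChar (PySem.Int.mod n 10).toNat]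

lemma toDigitsCore_eq : ∀ (f n : Nat) (ds : List Char), n < f →
    Nat.toDigitsCore 10 f n ds = myD n ++ ds := by
  intro f
  induction f with
  | zero => omega
  | succ f ih =>
    intro n ds h
    rw [Nat.toDigitsCore, myD]
    by_cases h10 : n < 10
    · have : n / 10 = 0 := Nat.div_eq_of_lt h10
      simp [this, h10, Nat.mod_eq_of_lt h10]
    · have hd : n / 10 ≠ 0 := by omega
      have : n / 10 < f := by
        have := Nat.div_lt_self (by omega : 0 < n) (by omega : 1 < 10)
        omega
      simp [hd, h10, ih _ _ this]

lemma toDigits_eq (n : Nat) : Nat.toDigits 10 n = myD n := by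
  rw [Nat.toDigits, toDigitsCore_eq _ _ _ (Nat.lt_succ_self n), List.append_nil]

lemma toChars_ofNat (n : Nat) : PySem.Int.toChars (n : Int) = myD n := by
  simp [PySem.Int.toChars, toDigits_eq]

lemma myD_ne_sign (m : Nat) : ∀ c ∈ myD m, c ≠ '+' ∧ c ≠ '-' := by
  induction m using myD.induct with
  | case1 m h =>
    rw [myD]; simp only [h, dite_true, List.mem_singleton]
    rintro c rfl
    interval_cases m <;> decide
  | case2 m h ih =>
    rw [myD]; simp only [h, dite_false, List.mem_append, List.mem_singleton]
    rintro c (hc | rfl)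
    · exact ih c hc
    · have hlt : m % 10 < 10 := Nat.mod_lt _ (by omega)
      interval_cases h' : m % 10 <;> decide

lemma myD_length_pos (m : Nat) : 0 < (myD m).length := by
  rw [myD]; split <;> simp

lemma zfill_nosign (cs : List Char) (hne : cs ≠ []) (hh : ∀ c ∈ cs, c ≠ '+' ∧ c ≠ '-') (k : Nat) :
    PySem.Chars.zfill cs (k : Int) = List.replicate (k - cs.length) '0' ++ cs := by
  rcases cs with _ | ⟨c, rest⟩
  · simp at hne
  rw [PySem.Chars.zfill.eq_def]
  by_cases h : (k : Int) ≤ ((c :: rest).length : Int)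
  · rw [if_pos h]
    have h0 : k - (c :: rest).length = 0 := by
      simp only [List.length_cons] at h ⊢; omega
    rw [h0]; rfl
  · rw [if_neg h]
    have hc := hh c (List.mem_cons_self)
    simp only [Int.toNat_natCast]
    rw [if_neg (by tauto)]

lemma padNat_zero (k : Nat) : padNat k 0 = List.replicate k '0' := by
  induction k with
  | zero => rfl
  | succ k ih =>
    rw [padNat, ih, List.replicate_succ']
    rfl

lemma padNat_eq (k : Nat) : ∀ m : Nat, 0 < k → m < 10 ^ k →
    padNat k m = List.replicate (k - (myD m).length) '0' ++ myD m := by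
  induction k with
  | zero => omega
  | succ k ih =>
    intro m _ hm
    by_cases h10 : m < 10
    · have hdiv : m / 10 = 0 := Nat.div_eq_of_lt h10
      rw [padNat, hdiv, padNat_zero, myD]
      simp [h10, Nat.mod_eq_of_lt h10, List.replicate_succ']
    · have hk : 0 < k := by
        by_contra hc; push_neg at hc
        interval_cases k; simp at hm; omega
      have hdm : m / 10 < 10 ^ k := by
        rw [Nat.div_lt_iff_lt_mul (by omega)]
        calc m < 10 ^ (k + 1) := hm
        _ = 10 ^ k * 10 := by ring
      rw [padNat, ih _ hk hdm]
      conv_rhs => rw [myD]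
      rw [dif_neg h10]
      have hlen : (myD (m / 10) ++ [Nat.digitChar (m % 10)]).length = (myD (m / 10)).length + 1 := by
        simp
      rw [hlen, List.append_assoc]
      have harith : k + 1 - ((myD (m / 10)).length + 1) = k - (myD (m / 10)).length := by omega
      rw [harith]

lemma emod_decomp (n p : Int) (hp : 0 < p) :
    n % (10 * p) = 10 * ((n / 10) % p) + n % 10 := by
  have h2 : (n / 10) % p + p * ((n / 10) / p) = n / 10 := Int.emod_add_ediv _ _
  have e1 : n = n % 10 + 10 * (n / 10) := by omega
  have hn : n = (10 * ((n / 10) % p) + n % 10) + (10 * p) * ((n / 10) / p) := by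
    linear_combination e1 - 10 * h2
  have hb1 : 0 ≤ (n / 10) % p := Int.emod_nonneg _ (by omega)
  have hb2 : (n / 10) % p < p := Int.emod_lt_of_pos _ hp
  have hb3 : 0 ≤ n % 10 := Int.emod_nonneg _ (by omega)
  have hb4 : n % 10 < 10 := Int.emod_lt_of_pos _ (by omega)
  conv_lhs => rw [hn]
  rw [Int.add_mul_emod_self_left]
  exact Int.emod_eq_of_lt (by omega) (by linarith)

lemma Lc_eq : ∀ (k : Nat) (n : Int), Lc n k = padNat k ((n % (10 ^ k : Int)).toNat) := by
  intro k
  induction k with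
  | zero => intro n; rfl
  | succ k ih =>
    intro n
    rw [Lc, ih, padNat]
    have hp : (0 : Int) < 10 ^ k := by positivity
    rw [PySem.Int.floordiv_eq_ediv_of_pos (by omega), PySem.Int.mod_eq_emod_of_pos (by omega)]
    have hdec : n % (10 ^ (k + 1) : Int) = 10 * ((n / 10) % (10 ^ k)) + n % 10 := by
      have h : (10 : Int) ^ (k + 1) = 10 * 10 ^ k := by ring
      rw [h, emod_decomp n _ hp]
    have hA : 0 ≤ (n / 10) % (10 ^ k : Int) := Int.emod_nonneg _ (by omega)
    have hB3 : 0 ≤ n % 10 := Int.emod_nonneg _ (by omega)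
    have hB4 : n % 10 < 10 := Int.emod_lt_of_pos _ (by omega)
    have hdiv : (n % (10 ^ (k + 1) : Int)).toNat / 10 = ((n / 10) % (10 ^ k : Int)).toNat := by
      omega
    have hmod : (n % (10 ^ (k + 1) : Int)).toNat % 10 = (n % 10).toNat := by
      omega
    rw [hdiv, hmod]

-- A's loop over any k-element list, with the state characterized
lemma foldA : ∀ (l : List Int) (n : Int) (w : List Char),
    l.foldl (fun (p : Int × List Char) _ =>
      (PySem.Int.floordiv p.1 10, PySem.Int.toChars (PySem.Int.mod p.1 10) ++ p.2)) (n, w)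
      = (n / (10 ^ l.length : Int), Lc n l.length ++ w) := by
  intro l
  induction l with
  | nil => intro n w; simp [Lc]
  | cons x xs ih =>
    intro n w
    rw [List.foldl_cons, ih]
    have hm0 : 0 ≤ PySem.Int.mod n 10 := PySem.Int.mod_nonneg n (by omega)
    have hm10 : PySem.Int.mod n 10 < 10 := PySem.Int.mod_lt n (by omega)
    have hcast : ((PySem.Int.mod n 10).toNat : Int) = PySem.Int.mod n 10 := Int.toNat_of_nonneg hm0
    have hchars : PySem.Int.toChars (PySem.Int.mod n 10) = [Nat.digitChar (PySem.Int.mod n 10).toNat] := by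
      rw [← hcast, toChars_ofNat, myD, dif_pos (by omega)]
      congr 1
    have hfd : PySem.Int.floordiv n 10 = n / 10 := PySem.Int.floordiv_eq_ediv_of_pos (by omega)
    simp only [List.length_cons, Prod.mk.injEq]
    constructor
    · rw [hfd, Int.ediv_ediv_of_nonneg (by omega : (0:Int) ≤ 10), pow_succ']
    · rw [hchars, Lc, List.append_assoc]

lemma length_pyRange_one (sigdigs : Int) : (PySem.List.pyRange 0 sigdigs 1).length = sigdigs.toNat := by
  rw [PySem.List.pyRange_one]
  simp

-- ===== VERDICT (by name: the statement is the Claim_ definition above) =====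
theorem weightString_spec : Claim_equal_weightString := by
  intro scaled sigdigs _
  show weightString scaled sigdigs = weightString_alt scaled sigdigs
  simp only [weightString, weightString_alt]
  by_cases hs : sigdigs ≤ 0
  · rw [if_pos hs, PySem.List.pyRange_one_eq_nil hs]
    rfl
  · rw [if_neg hs]
    push_neg at hs
    set k := sigdigs.toNat with hk
    have hks : (k : Int) = sigdigs := Int.toNat_of_nonneg (by omega)
    rw [← hks]
    rw [foldA, length_pyRange_one]
    simp only [Int.toNat_natCast]
    have hp : (0 : Int) < 10 ^ k := by positivity
    have hq : PySem.Int.floordiv scaled ((10 : Int) ^ k) = scaled / 10 ^ k :=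
      PySem.Int.floordiv_eq_ediv_of_pos hp
    have hr : PySem.Int.mod scaled ((10 : Int) ^ k) = scaled % 10 ^ k :=
      PySem.Int.mod_eq_emod_of_pos hp
    have hr0 : 0 ≤ scaled % (10 ^ k : Int) := Int.emod_nonneg _ (by omega)
    have hrlt : scaled % (10 ^ k : Int) < 10 ^ k := Int.emod_lt_of_pos _ hp
    have hcast : (((scaled % (10 ^ k : Int)).toNat : Int)) = scaled % 10 ^ k := Int.toNat_of_nonneg hr0
    have hchars : PySem.Int.toChars (PySem.Int.mod scaled ((10 : Int) ^ k)) = myD ((scaled % (10 ^ k : Int)).toNat) := by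
      rw [hr, ← hcast, toChars_ofNat]
      congr 1
    have hmlt : (scaled % (10 ^ k : Int)).toNat < 10 ^ k := by
      have : ((10 : Int) ^ k) = ((10 ^ k : Nat) : Int) := by push_cast; ring
      omega
    rw [hq, hchars,
      zfill_nosign _ (List.ne_nil_of_length_pos (myD_length_pos _)) (myD_ne_sign _) k,
      Lc_eq, padNat_eq k _ (by omega) hmlt, List.append_nil]
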